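-- pv_equiv track=rewrite | github.com/PeterSchuld/MITx6.00.1x_IntroToCS | satisfiesF.py | satisfiesF
-- ===== SOURCE A (Python) =====
-- def satisfiesF(L):
--     """
--     Assumes L is a list of strings
--     Assume function f is already defined for you and it maps a string to a Boolean
--     Mutates L such that it contains all of the strings, s, originally in L such
--             that f(s) returns True, and no other elements. Remaining elements in L
--             should be in the same order.
--     Returns the length of L after mutation
--     """
--     # Your function implementation here
--     L_old=L[:]
--     Liste=[]
--     for l in L_old:
--         if f(l)==True:
--             Liste.append(l)
--         elif f(l)==False:
--             L.remove(l)
--     L=Liste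
--     return(len(Liste))
--
-- def f(s):
--     return 'a' in s
-- ===== SOURCE B (Python) =====
-- def satisfiesF(L):
--     # In-place compaction with a write index: one O(n) pass, no list copy,
--     # no remove-by-value. Same return value and same final list contents as A.
--     w = 0
--     for r in range(len(L)):
--         if f(L[r]):
--             L[w] = L[r]
--             w += 1
--     del L[w:]
--     return w
--
-- def f(s):
--     return 'a' in s
-- ===== Notes on version B (the rewrite author's own statement) =====
-- stated objective: faster
-- what changed: Replaces A's copy-then-filter-with-remove (each remove is a linear scan, O(n^2) total) by a single-pass in-place compaction with a write index and one final truncation.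
import Mathlib
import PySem

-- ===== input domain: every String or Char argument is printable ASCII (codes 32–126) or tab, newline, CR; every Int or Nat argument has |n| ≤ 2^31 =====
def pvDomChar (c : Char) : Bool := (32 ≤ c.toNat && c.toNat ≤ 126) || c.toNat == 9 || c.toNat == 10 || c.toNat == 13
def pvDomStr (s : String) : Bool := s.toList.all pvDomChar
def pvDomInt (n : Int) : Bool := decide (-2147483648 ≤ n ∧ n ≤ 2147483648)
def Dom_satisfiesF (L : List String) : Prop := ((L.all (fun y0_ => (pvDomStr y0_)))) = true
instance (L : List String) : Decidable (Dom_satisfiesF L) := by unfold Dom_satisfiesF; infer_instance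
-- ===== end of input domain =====

-- B replaces A's copy-then-filter-with-list.remove by a one-pass in-place write-index
-- compaction (faster: removes the linear remove scans); equivalence is about the
-- RETURN value only (both mutate L; the final list contents coincide as well, untested here).


-- ===== PORT A =====
-- f(s) = 'a' in s
def pvF (s : String) : Bool := PySem.Str.isIn "a" s

-- literal port of A: L_old = L[:]; loop appending to Liste when f(l) is True,
-- removing l from L when f(l) is False; return len(Liste).
-- (L.remove(l) raises ValueError only if l ∉ L, which never happens here since the
--  multiset of L matches L_old on unprocessed elements; .getD st.2 is that dead branch.)
def satisfiesF (L : List String) : Int :=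
  let L_old := PySem.List.slice L none none
  let st := L_old.foldl
    (fun (st : List String × List String) l =>
      if pvF l = true then (st.1 ++ [l], st.2)
      else if pvF l = false then (st.1, (PySem.List.remove? st.2 l).getD st.2)
      else st)
    ([], L)
  (st.1.length : Int)

-- ===== PORT B =====
-- literal port of Source B: write index w, scan r over range(len(L)); L[w] = L[r] when
-- f(L[r]); del L[w:] truncates the (mutated) list and the return value is w.
def satisfiesF_alt (L : List String) : Int :=
  let st := (PySem.List.pyRange 0 (L.length : Int) 1).foldl
    (fun (st : List String × Int) r =>
      let x := (PySem.List.pyGet? st.1 r).getD ""   -- r is in range throughout the scan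
      if pvF x then (st.1.set st.2.toNat x, st.2 + 1) else st)
    (L, 0)
  st.2

-- ===== PRECONDITION & SPEC =====
def Spec_satisfiesF (L : List String) (out : Int) : Prop := out = satisfiesF_alt L
instance (L : List String) (out : Int) : Decidable (Spec_satisfiesF L out) := by unfold Spec_satisfiesF; infer_instance

-- ===== CLAIM (what is proved, stated in full; the proofs are below) =====
def Claim_equal_satisfiesF : Prop := ∀ (L : List String), Dom_satisfiesF L → Spec_satisfiesF L (satisfiesF L)

-- ===== LEMMAS AND PROOFS =====

-- A's loop: the first component (Liste) collects exactly the f-True elements.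
lemma pvA_loop (xs : List String) : ∀ (acc : List String) (cur : List String),
    ((xs.foldl
      (fun (st : List String × List String) l =>
        if pvF l = true then (st.1 ++ [l], st.2)
        else if pvF l = false then (st.1, (PySem.List.remove? st.2 l).getD st.2)
        else st)
      (acc, cur)).1).length = acc.length + xs.countP pvF := by
  induction xs with
  | nil => intro acc cur; simp
  | cons x xs ih =>
    intro acc cur
    by_cases h : pvF x = true
    · simp [List.foldl_cons, h, ih]; omega
    · simp [List.foldl_cons, h, ih]

-- B's loop invariant: while cur agrees with L0 from position r on (and has the same
-- length), the scan from r counts the f-True elements of L0.drop r.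
lemma pvB_loop (L0 : List String) : ∀ (d r : Nat) (cur : List String) (w : Int),
    L0.length - r = d →
    cur.length = L0.length →
    cur.drop r = L0.drop r →
    0 ≤ w → w ≤ (r : Int) →
    ((PySem.List.pyRange (r : Int) (L0.length : Int) 1).foldl
      (fun (st : List String × Int) j =>
        let x := (PySem.List.pyGet? st.1 j).getD ""
        if pvF x then (st.1.set st.2.toNat x, st.2 + 1) else st)
      (cur, w)).2 = w + ((L0.drop r).countP pvF : Int) := by
  intro d
  induction d with
  | zero =>
    intro r cur w hd hlen hdrop hw0 hwr
    have hr : L0.length ≤ r := by omega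
    rw [PySem.List.pyRange_one_eq_nil (by exact_mod_cast hr)]
    simp [List.drop_eq_nil_of_le hr]
  | succ d ih =>
    intro r cur w hd hlen hdrop hw0 hwr
    have hr : r < L0.length := by omega
    rw [PySem.List.pyRange_one_cons (by exact_mod_cast hr)]
    have hrc : r < cur.length := by omega
    have hget : PySem.List.pyGet? cur (r : Int) = some cur[r] := by
      simp [PySem.List.pyGet?, PySem.List.pyIdx?, hrc]
    have hcur : cur[r] = L0[r] := by
      have h1 : (cur.drop r)[0]'(by simp; omega) = (L0.drop r)[0]'(by simp; omega) := by
        simp [hdrop]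
      simpa using h1
    have htail : cur.drop (r + 1) = L0.drop (r + 1) := by
      have := congrArg (List.drop 1) hdrop
      simpa [List.drop_drop, Nat.add_comm] using this
    have hdropsucc : L0.drop r = L0[r] :: L0.drop (r + 1) := List.drop_eq_getElem_cons hr
    rw [List.foldl_cons]
    simp only [hget, Option.getD_some, hcur]
    have hcast : ((r : Int) + 1) = ((r + 1 : Nat) : Int) := by push_cast; ring
    rw [hcast]
    by_cases h : pvF L0[r]
    · rw [if_pos h]
      have hset : (cur.set w.toNat L0[r]).drop (r + 1) = L0.drop (r + 1) := by
        rw [← htail]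
        apply List.ext_getElem?
        intro i
        have hne : w.toNat ≠ r + 1 + i := by omega
        simp [List.getElem?_drop, hne]
      rw [ih (r + 1) (cur.set w.toNat L0[r]) (w + 1) (by omega) (by simp [hlen]) hset
        (by omega) (by push_cast; omega)]
      rw [hdropsucc, List.countP_cons]
      simp [h]
      ring
    · rw [if_neg h]
      rw [ih (r + 1) cur w (by omega) hlen htail hw0 (by push_cast; omega)]
      rw [hdropsucc, List.countP_cons]
      simp [h]

-- ===== VERDICT (by name: the statement is the Claim_ definition above) =====
theorem satisfiesF_spec : Claim_equal_satisfiesF := by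
  intro L _
  unfold Spec_satisfiesF satisfiesF satisfiesF_alt
  rw [PySem.List.slice_none_none]
  have hA := pvA_loop L ([]) L
  have hB := pvB_loop L (L.length) 0 L 0 (by omega) rfl rfl le_rfl (by simp)
  simp only [Nat.cast_zero] at hB
  simp only [hA, hB, List.drop_zero, List.length_nil, Nat.zero_add, Int.zero_add]
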